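-- pv_equiv track=rewrite | github.com/Greenhorntc/Ancient_Classic_Ner | Evaluate.py | merge_bio_tags
-- ===== SOURCE A (Python) =====
-- def merge_bio_tags(per, loc,time,ofi):
--     merged_tags = []
--     for tag1, tag2 ,tag3,tag4 in zip(per,loc,time,ofi):
--         if tag1 != 'O':
--             merged_tags.append(tag1)
--         elif tag2 != 'O':
--             merged_tags.append(tag2)
--         elif tag3!='O':
--             merged_tags.append(tag3)
--         else:
--             merged_tags.append(tag4)
--     return merged_tags
-- ===== SOURCE B (Python) =====
-- def merge_bio_tags(per, loc, time, ofi):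
--     n = min(len(per), len(loc), len(time), len(ofi))
--     merged = list(ofi[:n])
--     for layer in (time, loc, per):
--         for i in range(n):
--             if layer[i] != 'O':
--                 merged[i] = layer[i]
--     return merged
-- ===== Notes on version B (the rewrite author's own statement) =====
-- stated objective: alternative
-- what changed: Replaces the single zipped pass with a per-element if/elif priority chain by a layered-overlay algorithm: copy the lowest-priority sequence (ofi, truncated to the common length), then make three staged passes that overwrite each position with time, then loc, then per wherever that layer's tag is not 'O'.
import Mathlib
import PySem

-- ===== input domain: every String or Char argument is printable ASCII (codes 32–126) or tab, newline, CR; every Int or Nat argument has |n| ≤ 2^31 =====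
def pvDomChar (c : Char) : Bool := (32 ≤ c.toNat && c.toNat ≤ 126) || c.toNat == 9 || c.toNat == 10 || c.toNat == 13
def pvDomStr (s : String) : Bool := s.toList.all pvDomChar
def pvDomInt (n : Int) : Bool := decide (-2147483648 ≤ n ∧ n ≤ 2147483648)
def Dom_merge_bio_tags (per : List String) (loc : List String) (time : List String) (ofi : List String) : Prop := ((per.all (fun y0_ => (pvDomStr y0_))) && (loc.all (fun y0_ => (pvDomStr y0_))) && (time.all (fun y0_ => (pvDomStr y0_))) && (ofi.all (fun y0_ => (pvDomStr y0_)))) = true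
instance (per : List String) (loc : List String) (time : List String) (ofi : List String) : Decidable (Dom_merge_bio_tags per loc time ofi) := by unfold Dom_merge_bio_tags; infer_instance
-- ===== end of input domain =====

-- B replaces A's single zipped pass with an if/elif priority chain by a layered overlay:
-- copy ofi (truncated to the common length), then overwrite positions with time, loc, per
-- wherever that layer's tag is not "O"; alternative decomposition, same cost.

-- ===== PORT A =====
-- the loop body: for tag1,tag2,tag3,tag4 in zip(...): if/elif chain, merged_tags.append(...)
def mergeALoop : List (String × String × String × String) → List String → List String
  | [], merged_tags => merged_tags
  | (tag1, tag2, tag3, tag4) :: rest, merged_tags =>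
      mergeALoop rest (merged_tags ++
        [if tag1 ≠ "O" then tag1
         else if tag2 ≠ "O" then tag2
         else if tag3 ≠ "O" then tag3
         else tag4])

def merge_bio_tags (per : List String) (loc : List String) (time : List String) (ofi : List String) : List String :=
  mergeALoop (per.zip (loc.zip (time.zip ofi))) []

-- ===== PORT B =====
-- inner loop: for i in range(n): if layer[i] != 'O': merged[i] = layer[i]
def overlayLayer (n : Nat) (layer : List String) (merged : List String) : List String :=
  (List.range n).foldl
    (fun m i => if layer.getD i "" ≠ "O" then m.set i (layer.getD i "") else m) merged

-- n = min(len(per),len(loc),len(time),len(ofi)); merged = list(ofi[:n]); for layer in (time,loc,per): overlay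
def merge_bio_tags_alt (per : List String) (loc : List String) (time : List String) (ofi : List String) : List String :=
  let n := min (min (min per.length loc.length) time.length) ofi.length
  [time, loc, per].foldl (fun m layer => overlayLayer n layer m) (ofi.take n)

-- ===== PRECONDITION & SPEC =====
def Spec_merge_bio_tags (per : List String) (loc : List String) (time : List String) (ofi : List String) (out : List String) : Prop := out = merge_bio_tags_alt per loc time ofi
instance (per : List String) (loc : List String) (time : List String) (ofi : List String) (out : List String) : Decidable (Spec_merge_bio_tags per loc time ofi out) := by unfold Spec_merge_bio_tags; infer_instance

-- ===== CLAIM (what is proved, stated in full; the proofs are below) =====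
def Claim_equal_merge_bio_tags : Prop := ∀ (per : List String) (loc : List String) (time : List String) (ofi : List String), Dom_merge_bio_tags per loc time ofi → Spec_merge_bio_tags per loc time ofi (merge_bio_tags per loc time ofi)

-- ===== LEMMAS AND PROOFS =====
def pickA (tags : String × String × String × String) : String :=
  if tags.1 ≠ "O" then tags.1
  else if tags.2.1 ≠ "O" then tags.2.1
  else if tags.2.2.1 ≠ "O" then tags.2.2.1
  else tags.2.2.2

theorem mergeALoop_eq (l : List (String × String × String × String)) (acc : List String) :
    mergeALoop l acc = acc ++ l.map pickA := by
  induction l generalizing acc with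
  | nil => simp [mergeALoop]
  | cons hd tl ih =>
      obtain ⟨t1, t2, t3, t4⟩ := hd
      simp [mergeALoop, ih, pickA]

theorem overlayLayer_succ (k : Nat) (layer m : List String) :
    overlayLayer (k + 1) layer m =
      (if layer.getD k "" ≠ "O" then (overlayLayer k layer m).set k (layer.getD k "")
       else overlayLayer k layer m) := by
  unfold overlayLayer
  rw [List.range_succ, List.foldl_append]
  rfl

theorem overlayLayer_length (n : Nat) (layer m : List String) :
    (overlayLayer n layer m).length = m.length := by
  induction n with
  | zero => rfl
  | succ k ih =>
      rw [overlayLayer_succ]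
      split
      · rw [List.length_set, ih]
      · exact ih

theorem overlayLayer_getElem? (n : Nat) (layer m : List String) (i : Nat) (h : i < m.length) :
    (overlayLayer n layer m)[i]? =
      if i < n ∧ layer.getD i "" ≠ "O" then some (layer.getD i "") else m[i]? := by
  induction n with
  | zero => simp [overlayLayer]
  | succ k ih =>
      rw [overlayLayer_succ]
      by_cases hk : layer.getD k "" ≠ "O"
      · rw [if_pos hk, List.getElem?_set]
        by_cases hik : k = i
        · subst hik
          rw [if_pos rfl, if_pos (by rw [overlayLayer_length]; exact h)]
          have hc : k < k + 1 ∧ layer.getD k "" ≠ "O" := ⟨Nat.lt_succ_self k, hk⟩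
          rw [if_pos hc]
        · rw [if_neg hik, ih]
          by_cases hlt : i < k
          · simp [hlt, Nat.lt_succ_of_lt hlt]
          · have h2 : ¬ i < k + 1 := by omega
            simp [hlt, h2]
      · rw [if_neg hk, ih]
        by_cases hlt : i < k
        · simp [hlt, Nat.lt_succ_of_lt hlt]
        · by_cases hik : i = k
          · subst hik
            simp at hk
            simp [hk]
          · have h2 : ¬ i < k + 1 := by omega
            simp [hlt, h2]

-- ===== VERDICT (by name: the statement is the Claim_ definition above) =====
theorem merge_bio_tags_spec : Claim_equal_merge_bio_tags := by
  intro per loc time ofi _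
  unfold Spec_merge_bio_tags merge_bio_tags merge_bio_tags_alt
  rw [mergeALoop_eq]
  simp only [List.nil_append, List.foldl_cons, List.foldl_nil]
  set n := min (min (min per.length loc.length) time.length) ofi.length with hn
  have hlen : (per.zip (loc.zip (time.zip ofi))).length = n := by
    simp [List.length_zip, hn]; try omega
  have htake : (ofi.take n).length = n := by
    simp [hn]; try omega
  have h1 : (overlayLayer n time (ofi.take n)).length = n := by
    rw [overlayLayer_length, htake]
  have h2 : (overlayLayer n loc (overlayLayer n time (ofi.take n))).length = n := by
    rw [overlayLayer_length, h1]
  apply List.ext_getElem?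
  intro i
  by_cases hi : i < n
  · have hper : i < per.length := by omega
    have hloc : i < loc.length := by omega
    have htime : i < time.length := by omega
    have hofi : i < ofi.length := by omega
    rw [overlayLayer_getElem? (h := by omega),
       overlayLayer_getElem? (h := by omega),
       overlayLayer_getElem? (h := by rw [htake]; exact hi)]
    have hzip : i < (per.zip (loc.zip (time.zip ofi))).length := by omega
    rw [List.getElem?_eq_getElem (by simpa using hzip), List.getElem?_eq_getElem (by rw [htake]; exact hi)]
    rw [List.getElem_map, List.getElem_zip, List.getElem_zip, List.getElem_zip, List.getElem_take]
    rw [List.getD_eq_getElem _ _ hper, List.getD_eq_getElem _ _ hloc, List.getD_eq_getElem _ _ htime]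
    simp only [pickA, hi, true_and]
    by_cases e1 : per[i] = "O" <;> by_cases e2 : loc[i] = "O" <;> by_cases e3 : time[i] = "O" <;>
      simp [e1, e2, e3]
  · rw [List.getElem?_eq_none (by simp [hlen]; omega),
        List.getElem?_eq_none (by rw [overlayLayer_length, h2]; omega)]
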